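-- pv_equiv track=rewrite | github.com/mamcisaac/envy-zeitgeist-engine | collectors/youtube_engagement_collector.py | _is_reality_tv_content
-- ===== SOURCE A (Python) =====
-- from typing import Any, Dict, List, Optional
--
-- def _is_reality_tv_content(video_item: Dict[str, Any]) -> bool:
--     """Check if video content is related to reality TV.
--
--     Args:
--         video_item: YouTube video data from API.
--
--     Returns:
--         True if content is reality TV related, False otherwise.
--     """
--     snippet = video_item.get('snippet', {})
--     title_desc = f"{snippet.get('title', '')} {snippet.get('description', '')}".lower()
--
--     reality_keywords = [
--         'reality', 'housewives', 'love island', 'big brother', 'bachelorette',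
--         'challenge', '90 day', 'below deck', 'dating', 'romance', 'drama'
--     ]
--
--     return any(keyword in title_desc for keyword in reality_keywords)
-- ===== SOURCE B (Python) =====
-- _KEYWORDS = ('reality', 'housewives', 'love island', 'big brother', 'bachelorette',
--              'challenge', '90 day', 'below deck', 'dating', 'romance', 'drama')
--
--
-- def _is_reality_tv_content(video_item):
--     """Position-first scan: walk the lowercased text by index and test at each
--     offset whether some keyword starts there (same keyword set as A)."""
--     sn = video_item.get('snippet', {})
--     text = ' '.join((sn.get('title', ''), sn.get('description', ''))).lower()
--     i = 0
--     while i < len(text):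
--         for kw in _KEYWORDS:
--             if text.startswith(kw, i):
--                 return True
--         i += 1
--     return False
-- ===== Notes on version B (the rewrite author's own statement) =====
-- stated objective: alternative
-- what changed: Replaces A's keyword-first 'any(keyword in text)' substring tests with a position-first index scan of the text that at each offset does a prefix test for each keyword, and builds the text with ' '.join instead of an f-string.
import Mathlib
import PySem

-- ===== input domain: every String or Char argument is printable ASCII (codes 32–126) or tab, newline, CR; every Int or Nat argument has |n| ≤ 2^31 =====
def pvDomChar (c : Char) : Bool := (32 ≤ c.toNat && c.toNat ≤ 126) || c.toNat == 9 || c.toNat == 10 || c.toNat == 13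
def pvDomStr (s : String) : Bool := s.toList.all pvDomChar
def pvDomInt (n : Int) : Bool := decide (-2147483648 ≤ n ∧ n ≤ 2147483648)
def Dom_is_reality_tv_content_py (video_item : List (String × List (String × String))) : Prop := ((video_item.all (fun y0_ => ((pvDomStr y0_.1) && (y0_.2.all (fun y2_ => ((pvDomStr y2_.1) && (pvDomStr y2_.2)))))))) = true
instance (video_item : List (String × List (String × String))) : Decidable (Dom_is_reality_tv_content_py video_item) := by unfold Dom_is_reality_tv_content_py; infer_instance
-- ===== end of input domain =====

-- B replaces A's keyword-first 'any(keyword in text)' with a position-first index scan doing prefix tests; same result, similar cost.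

-- the shared keyword list (identical literals in A and B), as lists of chars
def pvKeywords : List (List Char) :=
  ["reality".toList, "housewives".toList, "love island".toList, "big brother".toList,
   "bachelorette".toList, "challenge".toList, "90 day".toList, "below deck".toList,
   "dating".toList, "romance".toList, "drama".toList]

-- ===== PORT A =====
def is_reality_tv_content_py (video_item : List (String × List (String × String))) : Bool :=
  let snippet := (PySem.Dict.mk video_item).getD "snippet" []
  let title_desc := PySem.Chars.lower
    (((PySem.Dict.mk snippet).getD "title" "").toList ++ [' '] ++
     ((PySem.Dict.mk snippet).getD "description" "").toList)
  pvKeywords.any (fun keyword => PySem.Chars.isIn keyword title_desc)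

-- ===== PORT B =====
-- Source B's inner 'for kw in _KEYWORDS: if text.startswith(kw, i)': prefix test at the current suffix
def pvHere : List (List Char) → List Char → Bool
  | [], _ => false
  | k :: ks, t => if List.isPrefixOf k t then true else pvHere ks t

-- Source B's outer 'while i < len(text)': advance one position at a time
def pvWalk : List Char → Bool
  | [] => false
  | c :: rest => if pvHere pvKeywords (c :: rest) then true else pvWalk rest

def is_reality_tv_content_py_alt (video_item : List (String × List (String × String))) : Bool :=
  let sn := (PySem.Dict.mk video_item).getD "snippet" []
  let text := PySem.Chars.lower
    (PySem.Chars.join " ".toList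
      [((PySem.Dict.mk sn).getD "title" "").toList, ((PySem.Dict.mk sn).getD "description" "").toList])
  pvWalk text

-- ===== PRECONDITION & SPEC =====
def Spec_is_reality_tv_content_py (video_item : List (String × List (String × String))) (out : Bool) : Prop := out = is_reality_tv_content_py_alt video_item
instance (video_item : List (String × List (String × String))) (out : Bool) : Decidable (Spec_is_reality_tv_content_py video_item out) := by unfold Spec_is_reality_tv_content_py; infer_instance

-- ===== CLAIM (what is proved, stated in full; the proofs are below) =====
def Claim_equal_is_reality_tv_content_py : Prop := ∀ (video_item : List (String × List (String × String))), Dom_is_reality_tv_content_py video_item → Spec_is_reality_tv_content_py video_item (is_reality_tv_content_py video_item)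

-- ===== LEMMAS AND PROOFS =====

theorem pvKeywords_ne_nil : ∀ k ∈ pvKeywords, k ≠ [] := by decide

theorem pvHere_iff (ks : List (List Char)) (t : List Char) :
    pvHere ks t = true ↔ ∃ k ∈ ks, k <+: t := by
  induction ks with
  | nil => simp [pvHere]
  | cons k ks ih =>
    rw [show (pvHere (k :: ks) t) = (if List.isPrefixOf k t then true else pvHere ks t) from rfl]
    split_ifs with h <;>
      simp_all [List.isPrefixOf_iff_prefix]

theorem pvWalk_iff (s : List Char) :
    pvWalk s = true ↔ ∃ t, t <:+ s ∧ t ≠ [] ∧ pvHere pvKeywords t = true := by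
  induction s with
  | nil => simp [pvWalk]
  | cons c r ih =>
    simp only [pvWalk]
    split_ifs with h
    · simp only [true_iff]
      exact ⟨c :: r, List.suffix_refl _, by simp, h⟩
    · rw [ih]
      constructor
      · rintro ⟨t, ht, hne, hk⟩; exact ⟨t, ht.trans (List.suffix_cons c r), hne, hk⟩
      · rintro ⟨t, ht, hne, hk⟩
        rcases List.suffix_cons_iff.mp ht with rfl | ht'
        · exact absurd hk (by simp [h])
        · exact ⟨t, ht', hne, hk⟩

-- B's position-first scan finds a keyword iff some keyword occurs as a substring
theorem pvWalk_eq_any_isIn (s : List Char) :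
    pvWalk s = pvKeywords.any (fun k => PySem.Chars.isIn k s) := by
  rw [Bool.eq_iff_iff, pvWalk_iff]
  simp only [List.any_eq_true, PySem.Chars.isIn_iff_infix]
  constructor
  · rintro ⟨t, ht, -, hk⟩
    rcases (pvHere_iff _ _).mp hk with ⟨k, hkmem, hpre⟩
    exact ⟨k, hkmem, List.infix_iff_prefix_suffix.mpr ⟨t, hpre, ht⟩⟩
  · rintro ⟨k, hkmem, hinf⟩
    rcases List.infix_iff_prefix_suffix.mp hinf with ⟨t, hpre, hsuf⟩
    refine ⟨t, hsuf, ?_, (pvHere_iff _ _).mpr ⟨k, hkmem, hpre⟩⟩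
    rintro rfl
    exact pvKeywords_ne_nil k hkmem (List.prefix_nil.mp hpre)

-- the two ports build the same lowercased text (join vs explicit ++)
theorem pvJoin_pair (a b : List Char) :
    PySem.Chars.join " ".toList [a, b] = a ++ [' '] ++ b := by
  simp [PySem.Chars.join, List.intercalate]

-- ===== VERDICT (by name: the statement is the Claim_ definition above) =====
theorem is_reality_tv_content_py_spec : Claim_equal_is_reality_tv_content_py := by
  intro video_item _
  show is_reality_tv_content_py video_item = is_reality_tv_content_py_alt video_item
  simp only [is_reality_tv_content_py, is_reality_tv_content_py_alt, pvJoin_pair,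
    pvWalk_eq_any_isIn]
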